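-- pv_equiv track=rewrite | github.com/CriticalInfinity/ProjectEulerSolutions | Problem30.py | digitToPower5
-- ===== SOURCE A (Python) =====
-- def digitToPower5(num):#to check if the sum of digits to the power of 5 is equal to the number itself
--     digisum=0
--     t=num
--     while t>0:#extracting the digits and raising it to the power of five and adding it to digisum
--         d=t%10
--         t=int(t/10)
--         digisum=digisum+(d**5)
--     if digisum==num:
--         return True
--     return False
-- ===== SOURCE B (Python) =====
-- def digitToPower5(num):
--     if num < 0:
--         return False
--     return sum(int(c) ** 5 for c in str(num)) == num
-- ===== Notes on version B (the rewrite author's own statement) =====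
-- stated objective: idiomatic
-- what changed: Replaces the arithmetic modulo/float-division digit-peeling loop with a direct comparison against the sum of 5th powers of the characters of str(num), guarded by a negative check.
import Mathlib
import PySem

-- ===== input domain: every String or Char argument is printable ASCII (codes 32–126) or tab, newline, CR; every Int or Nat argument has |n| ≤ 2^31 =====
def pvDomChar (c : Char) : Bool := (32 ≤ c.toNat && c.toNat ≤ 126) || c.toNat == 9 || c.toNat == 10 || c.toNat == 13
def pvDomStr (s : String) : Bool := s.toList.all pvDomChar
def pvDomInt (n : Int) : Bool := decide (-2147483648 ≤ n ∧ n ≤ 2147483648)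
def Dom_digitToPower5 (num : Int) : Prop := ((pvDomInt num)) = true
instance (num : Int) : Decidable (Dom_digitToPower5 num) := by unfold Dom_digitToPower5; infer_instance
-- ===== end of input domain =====

-- B replaces A's modulo/float-division digit-peeling loop with an idiomatic sum over the
-- characters of str(num), guarded by a negative check; return values agree on all of Dom.

-- ===== PORT A =====
-- the while loop: d = t % 10; t = int(t/10); digisum += d**5.  'int(t/10)' is Python float
-- division truncated, exact as PySem.Int.truncdiv on |t| ≤ 2^31 (< 2^53).
theorem pv_trunc_lt (t : Int) (h : 0 < t) : (PySem.Int.truncdiv t 10).toNat < t.toNat := by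
  have h1 : PySem.Int.truncdiv t 10 = t / 10 := by
    show t.tdiv 10 = t / 10
    exact Int.tdiv_eq_ediv_of_nonneg (by omega)
  rw [h1]
  have h2 : (t / 10) * 10 ≤ t := Int.ediv_mul_le t (by omega)
  omega

def pvLoopA (t digisum : Int) : Int :=
  if 0 < t then
    pvLoopA (PySem.Int.truncdiv t 10) (digisum + (PySem.Int.mod t 10) ^ 5)
  else digisum
termination_by t.toNat
decreasing_by exact pv_trunc_lt t (by assumption)

def digitToPower5 (num : Int) : Bool :=
  let digisum := pvLoopA num 0
  if digisum = num then true else false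

-- ===== PORT B =====
-- 'int(c)' on a single character, ported as PySem.Int.ofChars? [c]; the .getD 0 branch is
-- unreachable since str(num) for num ≥ 0 consists of digit characters only.
def digitToPower5_alt (num : Int) : Bool :=
  if num < 0 then false
  else decide ((((PySem.Int.toChars num).map (fun c => ((PySem.Int.ofChars? [c]).getD 0) ^ 5)).sum : Int) = num)

-- ===== PRECONDITION & SPEC =====
def Spec_digitToPower5 (num : Int) (out : Bool) : Prop := out = digitToPower5_alt num
instance (num : Int) (out : Bool) : Decidable (Spec_digitToPower5 num out) := by unfold Spec_digitToPower5; infer_instance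

-- ===== CLAIM (what is proved, stated in full; the proofs are below) =====
def Claim_equal_digitToPower5 : Prop := ∀ (num : Int), Dom_digitToPower5 num → Spec_digitToPower5 num (digitToPower5 num)

-- ===== LEMMAS AND PROOFS =====

-- the common value both sides compute for n ≥ 0: the sum of 5th powers of base-10 digits
def pvDigitSum (n : Nat) : Int := ((Nat.digits 10 n).map (fun d => (d : Int) ^ 5)).sum

theorem pvDigitSum_pos (n : Nat) (hn : 0 < n) :
    pvDigitSum n = ((n % 10 : Nat) : Int) ^ 5 + pvDigitSum (n / 10) := by
  unfold pvDigitSum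
  rw [Nat.digits_def' (by omega : 1 < 10) hn]
  simp

theorem pvLoopA_eq (n : Nat) (s : Int) : pvLoopA (n : Int) s = s + pvDigitSum n := by
  induction n using Nat.strong_induction_on generalizing s with
  | _ n ih =>
    rw [pvLoopA]
    by_cases h : 0 < (n : Int)
    · have hn : 0 < n := by exact_mod_cast h
      have htd : PySem.Int.truncdiv (n : Int) 10 = ((n / 10 : Nat) : Int) := by
        show (n : Int).tdiv 10 = ((n / 10 : Nat) : Int)
        rw [Int.tdiv_eq_ediv_of_nonneg (by omega)]
        omega
      have hm : PySem.Int.mod (n : Int) 10 = ((n % 10 : Nat) : Int) := by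
        exact_mod_cast PySem.Int.mod_natCast n 10
      rw [if_pos h, htd, hm, ih (n / 10) (Nat.div_lt_self hn (by omega)),
        pvDigitSum_pos n hn]
      ring
    · have hn : n = 0 := by omega
      subst hn
      simp [pvDigitSum]

-- character value of a digit char produced by Nat.digitChar, under int(c)
theorem pv_f5_digitChar (d : Nat) (hd : d < 10) :
    (((PySem.Int.ofChars? [Nat.digitChar d]).getD 0) ^ 5 : Int) = (d : Int) ^ 5 := by
  interval_cases d <;> decide

theorem pv_toDigitsCore_sum (f : Nat) :
    ∀ (n : Nat) (l : List Char), n < f →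
    ((Nat.toDigitsCore 10 f n l).map (fun c => (((PySem.Int.ofChars? [c]).getD 0) ^ 5 : Int))).sum
      = pvDigitSum n + ((l.map (fun c => (((PySem.Int.ofChars? [c]).getD 0) ^ 5 : Int))).sum) := by
  induction f with
  | zero => intro n l h; omega
  | succ f ih =>
    intro n l h
    rw [Nat.toDigitsCore]
    by_cases h0 : n / 10 = 0
    · have hn : n < 10 := by omega
      rw [if_pos h0]
      simp only [List.map_cons, List.sum_cons]
      rw [Nat.mod_eq_of_lt hn, pv_f5_digitChar n hn]
      by_cases hz : n = 0
      · subst hz; simp [pvDigitSum]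
      · rw [pvDigitSum_pos n (by omega), h0]
        simp [pvDigitSum, Nat.mod_eq_of_lt hn]
    · rw [if_neg h0]
      have hn : 0 < n := by
        by_contra hc
        exact h0 (by omega)
      rw [ih (n / 10) _ (by omega)]
      simp only [List.map_cons, List.sum_cons]
      rw [pv_f5_digitChar (n % 10) (Nat.mod_lt n (by omega)), pvDigitSum_pos n hn]
      ring

theorem pv_alt_sum (n : Nat) :
    (((Nat.toDigits 10 n).map (fun c => (((PySem.Int.ofChars? [c]).getD 0) ^ 5 : Int))).sum) = pvDigitSum n := by
  rw [Nat.toDigits, pv_toDigitsCore_sum (n + 1) n [] (by omega)]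
  simp

-- ===== VERDICT (by name: the statement is the Claim_ definition above) =====
theorem digitToPower5_spec : Claim_equal_digitToPower5 := by
  intro num _
  unfold Spec_digitToPower5 digitToPower5 digitToPower5_alt
  by_cases hneg : num < 0
  · rw [if_pos hneg]
    have hloop : pvLoopA num 0 = 0 := by rw [pvLoopA, if_neg (by omega)]
    simp [hloop]
    omega
  · rw [if_neg hneg]
    have hn : num = ((num.toNat : Nat) : Int) := by omega
    have htc : PySem.Int.toChars num = Nat.toDigits 10 num.toNat := by
      simp [PySem.Int.toChars, if_neg hneg]
    rw [htc, pv_alt_sum]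
    conv_lhs => rw [hn]
    rw [pvLoopA_eq num.toNat 0, zero_add, ← hn]
    by_cases he : pvDigitSum num.toNat = num <;> simp [he]
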